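-- pv_equiv track=rewrite | github.com/mars887/avi-boost-rework | utils/zone-editor.py | clip_ranges_to_timeline
-- ===== SOURCE A (Python) =====
-- from typing import Any, Dict, List, Optional, Sequence, Tuple
--
-- def normalize_frame_ranges(ranges: Sequence[Tuple[int, int]]) -> List[Tuple[int, int]]:
--     cleaned = sorted((int(a), int(b)) for a, b in ranges if int(b) > int(a))
--     out: List[Tuple[int, int]] = []
--     for start, end in cleaned:
--         if not out:
--             out.append((start, end))
--             continue
--         prev_start, prev_end = out[-1]
--         if start <= prev_end:
--             out[-1] = (prev_start, max(prev_end, end))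
--         else:
--             out.append((start, end))
--     return out
--
-- def clip_ranges_to_timeline(
--     ranges: Sequence[Tuple[int, int]],
--     timeline_start: int,
--     timeline_end: int,
-- ) -> List[Tuple[int, int]]:
--     clipped: List[Tuple[int, int]] = []
--     for start, end in ranges:
--         s0 = max(timeline_start, min(int(start), timeline_end))
--         s1 = max(timeline_start, min(int(end), timeline_end))
--         if s1 > s0:
--             clipped.append((s0, s1))
--     return normalize_frame_ranges(clipped)
-- ===== SOURCE B (Python) =====
-- def _merge_in(merged, s, e):
--     # merged is kept sorted, pairwise disjoint with gaps; splice [s, e) in.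
--     i = 0
--     n = len(merged)
--     while i < n and merged[i][1] < s:
--         i += 1
--     j = i
--     while j < n and merged[j][0] <= e:
--         s = min(s, merged[j][0])
--         e = max(e, merged[j][1])
--         j += 1
--     return merged[:i] + [(s, e)] + merged[j:]
--
--
-- def clip_ranges_to_timeline(ranges, timeline_start, timeline_end):
--     merged = []
--     for start, end in ranges:
--         s0 = max(timeline_start, min(int(start), timeline_end))
--         s1 = max(timeline_start, min(int(end), timeline_end))
--         if s1 > s0:
--             merged = _merge_in(merged, s0, s1)
--     return merged
-- ===== Notes on version B (the rewrite author's own statement) =====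
-- stated objective: alternative
-- what changed: Replaces A's collect-all-then-sort-then-merge pipeline by a single pass that maintains a sorted, gap-separated interval set and splices each clipped range into it by merging the overlapping block in place; no sort is performed.
import Mathlib
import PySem

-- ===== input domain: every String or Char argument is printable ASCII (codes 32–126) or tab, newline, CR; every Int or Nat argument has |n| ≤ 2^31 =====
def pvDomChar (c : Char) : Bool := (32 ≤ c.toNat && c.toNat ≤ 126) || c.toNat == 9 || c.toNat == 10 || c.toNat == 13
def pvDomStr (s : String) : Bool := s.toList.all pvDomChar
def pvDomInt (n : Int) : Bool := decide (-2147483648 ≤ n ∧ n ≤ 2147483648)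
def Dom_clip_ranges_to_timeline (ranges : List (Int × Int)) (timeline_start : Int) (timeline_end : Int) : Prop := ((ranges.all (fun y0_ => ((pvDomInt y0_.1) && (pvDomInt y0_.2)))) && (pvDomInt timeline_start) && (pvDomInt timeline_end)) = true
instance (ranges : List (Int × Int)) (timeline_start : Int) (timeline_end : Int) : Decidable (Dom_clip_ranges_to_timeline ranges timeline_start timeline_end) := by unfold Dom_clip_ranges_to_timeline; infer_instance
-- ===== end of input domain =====

-- B replaces A's collect/sort/merge pipeline by one pass that splices each clipped
-- range into a sorted gap-separated interval set (no sort): an alternative algorithm.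


-- ===== PORT A =====
-- one step of normalize_frame_ranges' merge loop ('if not out' / out[-1] access and rewrite)
def pvMergeStep (out : List (Int × Int)) (p : Int × Int) : List (Int × Int) :=
  match out.getLast? with
  | none => out ++ [p]
  | some q => if p.1 ≤ q.2 then out.dropLast ++ [(q.1, max q.2 p.2)] else out ++ [p]

def normalize_frame_ranges (ranges : List (Int × Int)) : List (Int × Int) :=
  let cleaned := PySem.List.sorted2 (ranges.filter (fun p => decide (p.1 < p.2))) (fun p => p.1) (fun p => p.2) false
  cleaned.foldl pvMergeStep []

-- the clipping loop of A
def pvClipStep (timeline_start timeline_end : Int) (acc : List (Int × Int)) (p : Int × Int) : List (Int × Int) :=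
  let s0 := max timeline_start (min p.1 timeline_end)
  let s1 := max timeline_start (min p.2 timeline_end)
  if s0 < s1 then acc ++ [(s0, s1)] else acc

def clip_ranges_to_timeline (ranges : List (Int × Int)) (timeline_start : Int) (timeline_end : Int) : List (Int × Int) :=
  normalize_frame_ranges (ranges.foldl (pvClipStep timeline_start timeline_end) [])

-- ===== PORT B =====
-- second while loop of B's _merge_in: absorb the block overlapping/touching [s, e)
def pvAbsorb : List (Int × Int) → Int → Int → List (Int × Int)
  | [], s, e => [(s, e)]
  | q :: t, s, e => if q.1 ≤ e then pvAbsorb t (min s q.1) (max e q.2) else (s, e) :: q :: t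

-- first while loop of B's _merge_in: keep the components entirely before [s, e)
def pvMergeIn : List (Int × Int) → Int → Int → List (Int × Int)
  | [], s, e => [(s, e)]
  | q :: t, s, e => if q.2 < s then q :: pvMergeIn t s e else pvAbsorb (q :: t) s e

def clip_ranges_to_timeline_alt (ranges : List (Int × Int)) (timeline_start : Int) (timeline_end : Int) : List (Int × Int) :=
  ranges.foldl (fun merged p =>
    let s0 := max timeline_start (min p.1 timeline_end)
    let s1 := max timeline_start (min p.2 timeline_end)
    if s0 < s1 then pvMergeIn merged s0 s1 else merged) []

-- ===== PRECONDITION & SPEC =====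
def Spec_clip_ranges_to_timeline (ranges : List (Int × Int)) (timeline_start : Int) (timeline_end : Int) (out : List (Int × Int)) : Prop := out = clip_ranges_to_timeline_alt ranges timeline_start timeline_end
instance (ranges : List (Int × Int)) (timeline_start : Int) (timeline_end : Int) (out : List (Int × Int)) : Decidable (Spec_clip_ranges_to_timeline ranges timeline_start timeline_end out) := by unfold Spec_clip_ranges_to_timeline; infer_instance

-- ===== CLAIM (what is proved, stated in full; the proofs are below) =====
def Claim_equal_clip_ranges_to_timeline : Prop := ∀ (ranges : List (Int × Int)) (timeline_start : Int) (timeline_end : Int), Dom_clip_ranges_to_timeline ranges timeline_start timeline_end → Spec_clip_ranges_to_timeline ranges timeline_start timeline_end (clip_ranges_to_timeline ranges timeline_start timeline_end)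

-- ===== LEMMAS AND PROOFS =====

-- x lies in one of the half-open integer intervals [p.1, p.2) of L
def pvCovers (L : List (Int × Int)) (x : Int) : Prop := ∃ p ∈ L, p.1 ≤ x ∧ x < p.2

-- canonical merged form: sorted, nonempty intervals, separated by gaps
def pvCanon (M : List (Int × Int)) : Prop :=
  M.IsChain (fun p q => p.2 < q.1) ∧ ∀ p ∈ M, p.1 < p.2

-- the same, accumulated in reverse (A's merge loop rewritten with a reversed accumulator)
def pvCanonR (M : List (Int × Int)) : Prop :=
  M.IsChain (fun p q => q.2 < p.1) ∧ ∀ p ∈ M, p.1 < p.2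

-- x covered by the clipped image of ranges
def pvClipCov (ts te : Int) (ranges : List (Int × Int)) (x : Int) : Prop :=
  ∃ p ∈ ranges, max ts (min p.1 te) ≤ x ∧ x < max ts (min p.2 te)

theorem pvCovers_nil (x : Int) : ¬ pvCovers [] x := by simp [pvCovers]

theorem pvCovers_cons (p : Int × Int) (L : List (Int × Int)) (x : Int) :
    pvCovers (p :: L) x ↔ (p.1 ≤ x ∧ x < p.2) ∨ pvCovers L x := by
  simp [pvCovers]

theorem pvCovers_append (L₁ L₂ : List (Int × Int)) (x : Int) :
    pvCovers (L₁ ++ L₂) x ↔ pvCovers L₁ x ∨ pvCovers L₂ x := by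
  simp [pvCovers, or_and_right, exists_or]

theorem pvCovers_perm {L₁ L₂ : List (Int × Int)} (h : L₁.Perm L₂) (x : Int) :
    pvCovers L₁ x ↔ pvCovers L₂ x := by
  unfold pvCovers
  exact ⟨fun ⟨p, hm, hb⟩ => ⟨p, h.mem_iff.mp hm, hb⟩, fun ⟨p, hm, hb⟩ => ⟨p, h.mem_iff.mpr hm, hb⟩⟩

theorem pvCovers_reverse (L : List (Int × Int)) (x : Int) :
    pvCovers L.reverse x ↔ pvCovers L x :=
  pvCovers_perm (List.reverse_perm L) x

theorem pvCanon_tail {p : Int × Int} {M : List (Int × Int)} (h : pvCanon (p :: M)) : pvCanon M :=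
  ⟨h.1.of_cons, fun q hq => h.2 q (List.mem_cons_of_mem _ hq)⟩

theorem pvCanon_head_lt : ∀ (M : List (Int × Int)) (p : Int × Int),
    pvCanon (p :: M) → ∀ q ∈ M, p.2 < q.1 := by
  intro M
  induction M with
  | nil => simp
  | cons r M ih =>
    intro p h q hq
    have hpr : p.2 < r.1 := (List.isChain_cons_cons.mp h.1).1
    rcases List.mem_cons.mp hq with hq | hq
    · subst hq; exact hpr
    · have hr12 : r.1 < r.2 := h.2 r (by simp)
      have := ih r (pvCanon_tail h) q hq
      omega

theorem pvCovers_head_le {p : Int × Int} {M : List (Int × Int)} (h : pvCanon (p :: M))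
    {x : Int} (hx : pvCovers (p :: M) x) : p.1 ≤ x := by
  rcases (pvCovers_cons p M x).mp hx with hx | ⟨r, hr, hb⟩
  · exact hx.1
  · have := pvCanon_head_lt M p h r hr
    have := h.2 p (by simp)
    omega

theorem pvNotCovers_end {p : Int × Int} {M : List (Int × Int)} (h : pvCanon (p :: M)) :
    ¬ pvCovers (p :: M) p.2 := by
  intro hx
  rcases (pvCovers_cons p M p.2).mp hx with hx | ⟨r, hr, hb⟩
  · omega
  · have := pvCanon_head_lt M p h r hr
    omega

theorem pvUnique : ∀ (M N : List (Int × Int)), pvCanon M → pvCanon N →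
    (∀ x, pvCovers M x ↔ pvCovers N x) → M = N := by
  intro M
  induction M with
  | nil =>
    intro N _ hN h
    cases N with
    | nil => rfl
    | cons q N' =>
      exfalso
      have hq : q.1 < q.2 := hN.2 q (by simp)
      exact pvCovers_nil q.1 ((h q.1).mpr ⟨q, by simp, le_refl _, hq⟩)
  | cons p M' ih =>
    intro N hM hN h
    cases N with
    | nil =>
      exfalso
      have hp : p.1 < p.2 := hM.2 p (by simp)
      exact pvCovers_nil p.1 ((h p.1).mp ⟨p, by simp, le_refl _, hp⟩)
    | cons q N' =>
      have hp12 : p.1 < p.2 := hM.2 p (by simp)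
      have hq12 : q.1 < q.2 := hN.2 q (by simp)
      have h1 : q.1 ≤ p.1 := pvCovers_head_le hN ((h p.1).mp ⟨p, by simp, le_refl _, hp12⟩)
      have h2 : p.1 ≤ q.1 := pvCovers_head_le hM ((h q.1).mpr ⟨q, by simp, le_refl _, hq12⟩)
      have heq1 : p.1 = q.1 := le_antisymm h2 h1
      have heq2 : p.2 = q.2 := by
        by_contra hne
        rcases lt_or_gt_of_ne hne with hlt | hgt
        · exact pvNotCovers_end hM ((h p.2).mpr ⟨q, by simp, by omega, by omega⟩)
        · exact pvNotCovers_end hN ((h q.2).mp ⟨p, by simp, by omega, by omega⟩)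
      have hpq : p = q := Prod.ext heq1 heq2
      have htails : M' = N' := by
        apply ih N' (pvCanon_tail hM) (pvCanon_tail hN)
        intro x
        constructor
        · intro hx
          obtain ⟨r, hr, hb⟩ := hx
          have hgt : p.2 < x := by have := pvCanon_head_lt M' p hM r hr; omega
          rcases (pvCovers_cons q N' x).mp ((h x).mp ((pvCovers_cons p M' x).mpr (Or.inr ⟨r, hr, hb⟩))) with hhx | hhx
          · omega
          · exact hhx
        · intro hx
          obtain ⟨r, hr, hb⟩ := hx
          have hgt : q.2 < x := by have := pvCanon_head_lt N' q hN r hr; omega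
          rcases (pvCovers_cons p M' x).mp ((h x).mpr ((pvCovers_cons q N' x).mpr (Or.inr ⟨r, hr, hb⟩))) with hhx | hhx
          · omega
          · exact hhx
      rw [hpq, htails]

-- ---------- A side ----------

-- the Boolean lexicographic comparator CPython's tuple sort uses (as instantiated by sorted2)
def pvBlex (a b : Int × Int) : Bool :=
  decide (a.1 < b.1) || (!decide (b.1 < a.1) && decide (a.2 < b.2))

theorem pvSorted2_eq (xs : List (Int × Int)) :
    PySem.List.sorted2 xs (fun p => p.1) (fun p => p.2) false
      = xs.foldl (fun acc x => PySem.List.insertBy pvBlex x acc) [] := rfl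

theorem pvInsertBy_fst_pairwise (x : Int × Int) :
    ∀ (ys : List (Int × Int)), ys.Pairwise (fun p q => p.1 ≤ q.1) →
    (PySem.List.insertBy pvBlex x ys).Pairwise (fun p q => p.1 ≤ q.1) := by
  intro ys
  induction ys with
  | nil => intro _; simp [PySem.List.insertBy]
  | cons y ys ih =>
    intro h
    obtain ⟨hy, ht⟩ := List.pairwise_cons.mp h
    rw [PySem.List.insertBy]
    by_cases hb : pvBlex x y = true
    · rw [if_pos hb]
      have hxy : x.1 ≤ y.1 := by
        simp only [pvBlex, Bool.or_eq_true, Bool.and_eq_true, decide_eq_true_eq,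
          Bool.not_eq_true', decide_eq_false_iff_not] at hb
        omega
      refine List.pairwise_cons.mpr ⟨?_, h⟩
      intro z hz
      rcases List.mem_cons.mp hz with hz | hz
      · subst hz; exact hxy
      · exact le_trans hxy (hy z hz)
    · rw [if_neg hb]
      have hyx : y.1 ≤ x.1 := by
        simp only [pvBlex, Bool.or_eq_true, Bool.and_eq_true, decide_eq_true_eq,
          Bool.not_eq_true', decide_eq_false_iff_not] at hb
        omega
      refine List.pairwise_cons.mpr ⟨?_, ih ht⟩
      intro z hz
      rcases (PySem.List.insertBy_mem_iff pvBlex x z ys).mp hz with hz | hz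
      · subst hz; exact hyx
      · exact hy z hz

theorem pvSorted2_fst_pairwise (xs : List (Int × Int)) :
    (PySem.List.sorted2 xs (fun p => p.1) (fun p => p.2) false).Pairwise (fun p q => p.1 ≤ q.1) := by
  rw [pvSorted2_eq]
  suffices h : ∀ (l acc : List (Int × Int)), acc.Pairwise (fun p q => p.1 ≤ q.1) →
      (l.foldl (fun acc x => PySem.List.insertBy pvBlex x acc) acc).Pairwise (fun p q => p.1 ≤ q.1) by
    exact h xs [] (by simp)
  intro l
  induction l with
  | nil => intro acc h; simpa using h
  | cons p l ih => intro acc h; exact ih _ (pvInsertBy_fst_pairwise p acc h)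

-- A's merge loop, on a reversed accumulator (head = Python's out[-1])
def pvRevStep (racc : List (Int × Int)) (p : Int × Int) : List (Int × Int) :=
  match racc with
  | [] => [p]
  | q :: t => if p.1 ≤ q.2 then (q.1, max q.2 p.2) :: t else p :: q :: t

theorem pvMergeStep_rev (out : List (Int × Int)) (p : Int × Int) :
    pvMergeStep out p = (pvRevStep out.reverse p).reverse := by
  rcases h : out.reverse with _ | ⟨q, t⟩
  · have : out = [] := by simpa using congrArg List.reverse h
    subst this
    simp [pvMergeStep, pvRevStep]
  · have hout : out = t.reverse ++ [q] := by
      have := congrArg List.reverse h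
      simpa using this
    subst hout
    by_cases hb : p.1 ≤ q.2
    · simp [pvMergeStep, pvRevStep, hb]
    · simp [pvMergeStep, pvRevStep, hb]

theorem pvFoldl_merge_rev : ∀ (l racc : List (Int × Int)),
    l.foldl pvMergeStep racc.reverse = (l.foldl pvRevStep racc).reverse := by
  intro l
  induction l with
  | nil => intro racc; rfl
  | cons p l ih =>
    intro racc
    rw [List.foldl_cons, List.foldl_cons, pvMergeStep_rev, List.reverse_reverse, ih]

theorem pvRevFold_inv : ∀ (l racc : List (Int × Int)),
    (∀ p ∈ l, p.1 < p.2) → l.Pairwise (fun p q => p.1 ≤ q.1) → pvCanonR racc →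
    (∀ q, racc.head? = some q → ∀ p ∈ l, q.1 ≤ p.1) →
    pvCanonR (l.foldl pvRevStep racc) ∧
    (∀ x, pvCovers (l.foldl pvRevStep racc) x ↔ pvCovers racc x ∨ pvCovers l x) := by
  intro l
  induction l with
  | nil =>
    intro racc _ _ hc _
    exact ⟨hc, fun x => by simp [pvCovers_nil]⟩
  | cons p l ih =>
    intro racc hlt hpw hc hhead
    obtain ⟨hpw_head, hpw_tail⟩ := List.pairwise_cons.mp hpw
    have hp12 : p.1 < p.2 := hlt p (by simp)
    have hlt' : ∀ r ∈ l, r.1 < r.2 := fun r hr => hlt r (by simp [hr])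
    rw [List.foldl_cons]
    cases racc with
    | nil =>
      have hstep : pvRevStep [] p = [p] := rfl
      rw [hstep]
      obtain ⟨hcn, hcov⟩ := ih [p] hlt' hpw_tail
        ⟨by simp, by simpa using hp12⟩
        (by intro q hq r hr; simp at hq; subst hq; exact hpw_head r hr)
      refine ⟨hcn, fun x => ?_⟩
      rw [hcov x]
      simp only [pvCovers_cons, pvCovers_nil]
      tauto
    | cons q t =>
      obtain ⟨hchain, hbound⟩ := hc
      have hq12 : q.1 < q.2 := hbound q (by simp)
      by_cases hb : p.1 ≤ q.2
      · have hstep : pvRevStep (q :: t) p = (q.1, max q.2 p.2) :: t := by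
          simp [pvRevStep, hb]
        rw [hstep]
        have hq1p1 : q.1 ≤ p.1 := hhead q rfl p (by simp)
        have hcanon' : pvCanonR ((q.1, max q.2 p.2) :: t) := by
          constructor
          · rcases t with _ | ⟨r, t'⟩
            · simp
            · have := (List.isChain_cons_cons.mp hchain)
              exact List.isChain_cons_cons.mpr ⟨by simpa using this.1, this.2⟩
          · intro r hr
            rcases List.mem_cons.mp hr with hr | hr
            · subst hr; simp; omega
            · exact hbound r (by simp [hr])
        obtain ⟨hcn, hcov⟩ := ih _ hlt' hpw_tail hcanon'
          (by intro q' hq' r hr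
              simp at hq'
              have : q'.1 = q.1 := by rw [← hq']
              rw [this]
              exact le_trans hq1p1 (hpw_head r hr))
        refine ⟨hcn, fun x => ?_⟩
        rw [hcov x]
        simp only [pvCovers_cons]
        have hiv : ((q.1, max q.2 p.2).1 ≤ x ∧ x < (q.1, max q.2 p.2).2) ↔
            ((q.1 ≤ x ∧ x < q.2) ∨ (p.1 ≤ x ∧ x < p.2)) := by
          simp only []
          omega
        rw [hiv]
        tauto
      · have hstep : pvRevStep (q :: t) p = p :: q :: t := by
          simp [pvRevStep, hb]
        rw [hstep]
        have hcanon' : pvCanonR (p :: q :: t) := by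
          constructor
          · exact List.isChain_cons_cons.mpr ⟨by omega, hchain⟩
          · intro r hr
            rcases List.mem_cons.mp hr with hr | hr
            · subst hr; exact hp12
            · exact hbound r hr
        obtain ⟨hcn, hcov⟩ := ih _ hlt' hpw_tail hcanon'
          (by intro q' hq' r hr
              simp at hq'
              have : q'.1 = p.1 := by rw [← hq']
              rw [this]
              exact hpw_head r hr)
        refine ⟨hcn, fun x => ?_⟩
        rw [hcov x]
        simp only [pvCovers_cons]
        tauto

theorem pvCanonR_reverse {r : List (Int × Int)} (h : pvCanonR r) : pvCanon r.reverse := by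
  constructor
  · exact List.isChain_reverse.mpr h.1
  · intro p hp; exact h.2 p (by simpa using hp)

theorem pvCovers_filter (C : List (Int × Int)) (x : Int) :
    pvCovers (C.filter (fun p => decide (p.1 < p.2))) x ↔ pvCovers C x := by
  unfold pvCovers
  constructor
  · rintro ⟨p, hp, hb⟩
    exact ⟨p, (List.mem_filter.mp hp).1, hb⟩
  · rintro ⟨p, hp, hb⟩
    exact ⟨p, List.mem_filter.mpr ⟨hp, by simp; omega⟩, hb⟩

theorem pvNormalize_result (C : List (Int × Int)) :
    pvCanon (normalize_frame_ranges C) ∧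
    (∀ x, pvCovers (normalize_frame_ranges C) x ↔ pvCovers C x) := by
  unfold normalize_frame_ranges
  have hperm : (PySem.List.sorted2 (C.filter (fun p => decide (p.1 < p.2)))
      (fun p => p.1) (fun p => p.2) false).Perm (C.filter (fun p => decide (p.1 < p.2))) :=
    PySem.List.sorted2_perm _ _ _ _
  have hlt : ∀ p ∈ PySem.List.sorted2 (C.filter (fun p => decide (p.1 < p.2)))
      (fun p => p.1) (fun p => p.2) false, p.1 < p.2 := by
    intro p hp
    have := (List.mem_filter.mp (hperm.mem_iff.mp hp)).2
    simpa using this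
  have hpw := pvSorted2_fst_pairwise (C.filter (fun p => decide (p.1 < p.2)))
  obtain ⟨hcn, hcov⟩ := pvRevFold_inv _ [] hlt hpw ⟨by simp, by simp⟩ (by simp)
  have hrw : (PySem.List.sorted2 (C.filter (fun p => decide (p.1 < p.2)))
        (fun p => p.1) (fun p => p.2) false).foldl pvMergeStep []
      = ((PySem.List.sorted2 (C.filter (fun p => decide (p.1 < p.2)))
        (fun p => p.1) (fun p => p.2) false).foldl pvRevStep []).reverse := by
    have := pvFoldl_merge_rev (PySem.List.sorted2 (C.filter (fun p => decide (p.1 < p.2)))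
        (fun p => p.1) (fun p => p.2) false) []
    simpa using this
  rw [hrw]
  refine ⟨pvCanonR_reverse hcn, fun x => ?_⟩
  rw [pvCovers_reverse, hcov x]
  simp only [pvCovers_nil, false_or]
  rw [pvCovers_perm hperm x, pvCovers_filter]

theorem pvClipCov_cons (ts te : Int) (p : Int × Int) (l : List (Int × Int)) (x : Int) :
    pvClipCov ts te (p :: l) x ↔
      (max ts (min p.1 te) ≤ x ∧ x < max ts (min p.2 te)) ∨ pvClipCov ts te l x := by
  simp [pvClipCov]

theorem pvClip_foldl_cov (ts te : Int) : ∀ (l acc : List (Int × Int)) (x : Int),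
    pvCovers (l.foldl (pvClipStep ts te) acc) x ↔ pvCovers acc x ∨ pvClipCov ts te l x := by
  intro l
  induction l with
  | nil => intro acc x; simp [pvClipCov]
  | cons p l ih =>
    intro acc x
    rw [List.foldl_cons, pvClipCov_cons]
    by_cases h : max ts (min p.1 te) < max ts (min p.2 te)
    · have hstep : pvClipStep ts te acc p = acc ++ [(max ts (min p.1 te), max ts (min p.2 te))] := by
        simp [pvClipStep, h]
      rw [hstep, ih, pvCovers_append]
      simp only [pvCovers_cons, pvCovers_nil]
      tauto
    · have hstep : pvClipStep ts te acc p = acc := by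
        simp [pvClipStep, h]
      rw [hstep, ih]
      have : ¬ (max ts (min p.1 te) ≤ x ∧ x < max ts (min p.2 te)) := by omega
      tauto

-- ---------- B side ----------

theorem pvAbsorb_spec : ∀ (M : List (Int × Int)) (s e : Int), pvCanon M → s < e →
    (∀ q, M.head? = some q → s ≤ q.2) →
    pvCanon (pvAbsorb M s e) ∧
    (∀ x, pvCovers (pvAbsorb M s e) x ↔ pvCovers M x ∨ (s ≤ x ∧ x < e)) ∧
    (∀ z, z < s → (∀ p ∈ M, z < p.1) → ∀ p ∈ pvAbsorb M s e, z < p.1) := by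
  intro M
  induction M with
  | nil =>
    intro s e _ hse _
    rw [show pvAbsorb [] s e = [(s, e)] from rfl]
    refine ⟨⟨by simp, ?_⟩, fun x => ?_, ?_⟩
    · intro p hp; simp at hp; rw [hp]; exact hse
    · simp [pvCovers_cons, pvCovers_nil]
    · intro z hzs _ p hp
      simp at hp
      rw [hp]
      exact hzs
  | cons q t ih =>
    intro s e hc hse hhead
    have hq12 : q.1 < q.2 := hc.2 q (by simp)
    have hsq2 : s ≤ q.2 := hhead q rfl
    have hct : pvCanon t := pvCanon_tail hc
    by_cases hqe : q.1 ≤ e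
    · have hstep : pvAbsorb (q :: t) s e = pvAbsorb t (min s q.1) (max e q.2) := by
        simp [pvAbsorb, hqe]
      rw [hstep]
      have hhead' : ∀ r, t.head? = some r → min s q.1 ≤ r.2 := by
        intro r hr
        have hmem : r ∈ t := List.mem_of_mem_head? hr
        have hqr : q.2 < r.1 := pvCanon_head_lt t q hc r hmem
        have hr12 : r.1 < r.2 := hct.2 r hmem
        omega
      obtain ⟨hcn, hcov, hz⟩ := ih (min s q.1) (max e q.2) hct (by omega) hhead'
      refine ⟨hcn, fun x => ?_, ?_⟩
      · rw [hcov x]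
        simp only [pvCovers_cons]
        have hiv : (min s q.1 ≤ x ∧ x < max e q.2) ↔
            ((q.1 ≤ x ∧ x < q.2) ∨ (s ≤ x ∧ x < e)) := by omega
        rw [hiv]
        tauto
      · intro z hzs hzl p hp
        have hzq : z < q.1 := hzl q (by simp)
        exact hz z (by omega) (fun r hr => hzl r (by simp [hr])) p hp
    · have hstep : pvAbsorb (q :: t) s e = (s, e) :: q :: t := by
        simp [pvAbsorb, hqe]
      rw [hstep]
      refine ⟨⟨List.isChain_cons_cons.mpr ⟨by simp; omega, hc.1⟩, ?_⟩, fun x => ?_, ?_⟩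
      · intro r hr
        rcases List.mem_cons.mp hr with hr | hr
        · rw [hr]; exact hse
        · exact hc.2 r hr
      · simp only [pvCovers_cons]
        tauto
      · intro z hzs hzl p hp
        rcases List.mem_cons.mp hp with hp | hp
        · rw [hp]; exact hzs
        · exact hzl p hp

theorem pvMergeIn_spec : ∀ (M : List (Int × Int)) (s e : Int), pvCanon M → s < e →
    pvCanon (pvMergeIn M s e) ∧
    (∀ x, pvCovers (pvMergeIn M s e) x ↔ pvCovers M x ∨ (s ≤ x ∧ x < e)) ∧
    (∀ z, z < s → (∀ p ∈ M, z < p.1) → ∀ p ∈ pvMergeIn M s e, z < p.1) := by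
  intro M
  induction M with
  | nil =>
    intro s e _ hse
    rw [show pvMergeIn [] s e = [(s, e)] from rfl]
    refine ⟨⟨by simp, ?_⟩, fun x => ?_, ?_⟩
    · intro p hp; simp at hp; rw [hp]; exact hse
    · simp [pvCovers_cons, pvCovers_nil]
    · intro z hzs _ p hp
      simp at hp
      rw [hp]
      exact hzs
  | cons q t ih =>
    intro s e hc hse
    have hq12 : q.1 < q.2 := hc.2 q (by simp)
    have hct : pvCanon t := pvCanon_tail hc
    by_cases hq2 : q.2 < s
    · have hstep : pvMergeIn (q :: t) s e = q :: pvMergeIn t s e := by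
        simp [pvMergeIn, hq2]
      rw [hstep]
      obtain ⟨hcn, hcov, hz⟩ := ih s e hct hse
      have hall : ∀ p ∈ pvMergeIn t s e, q.2 < p.1 :=
        hz q.2 hq2 (fun p hp => pvCanon_head_lt t q hc p hp)
      refine ⟨⟨?_, ?_⟩, fun x => ?_, ?_⟩
      · apply List.isChain_cons.mpr
        refine ⟨?_, hcn.1⟩
        intro b hb
        exact hall b (List.mem_of_mem_head? hb)
      · intro r hr
        rcases List.mem_cons.mp hr with hr | hr
        · rw [hr]; exact hq12
        · exact hcn.2 r hr
      · rw [pvCovers_cons, hcov x, pvCovers_cons]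
        tauto
      · intro z hzs hzl p hp
        rcases List.mem_cons.mp hp with hp | hp
        · rw [hp]; exact hzl q (by simp)
        · exact hz z hzs (fun r hr => hzl r (by simp [hr])) p hp
    · have hstep : pvMergeIn (q :: t) s e = pvAbsorb (q :: t) s e := by
        simp [pvMergeIn, hq2]
      rw [hstep]
      exact pvAbsorb_spec (q :: t) s e hc hse (by intro r hr; simp at hr; subst hr; omega)

-- B's per-range step (the body of B's fold), named for the proofs below
def pvBStep (ts te : Int) (merged : List (Int × Int)) (p : Int × Int) : List (Int × Int) :=
  let s0 := max ts (min p.1 te)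
  let s1 := max ts (min p.2 te)
  if s0 < s1 then pvMergeIn merged s0 s1 else merged

theorem pvAlt_eq (ranges : List (Int × Int)) (ts te : Int) :
    clip_ranges_to_timeline_alt ranges ts te = ranges.foldl (pvBStep ts te) [] := rfl

theorem pvBFold_inv (ts te : Int) : ∀ (l m : List (Int × Int)), pvCanon m →
    pvCanon (l.foldl (pvBStep ts te) m) ∧
    (∀ x, pvCovers (l.foldl (pvBStep ts te) m) x ↔ pvCovers m x ∨ pvClipCov ts te l x) := by
  intro l
  induction l with
  | nil =>
    intro m hm
    exact ⟨hm, fun x => by simp [pvClipCov]⟩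
  | cons p l ih =>
    intro m hm
    rw [List.foldl_cons]
    by_cases h : max ts (min p.1 te) < max ts (min p.2 te)
    · have hstep : pvBStep ts te m p = pvMergeIn m (max ts (min p.1 te)) (max ts (min p.2 te)) := by
        simp only [pvBStep, if_pos h]
      rw [hstep]
      obtain ⟨hcn, hcov, _⟩ := pvMergeIn_spec m _ _ hm h
      obtain ⟨hcn', hcov'⟩ := ih _ hcn
      refine ⟨hcn', fun x => ?_⟩
      rw [hcov' x, hcov x, pvClipCov_cons]
      tauto
    · have hstep : pvBStep ts te m p = m := by
        simp only [pvBStep, if_neg h]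
      rw [hstep]
      obtain ⟨hcn', hcov'⟩ := ih m hm
      refine ⟨hcn', fun x => ?_⟩
      rw [hcov' x, pvClipCov_cons]
      have : ¬ (max ts (min p.1 te) ≤ x ∧ x < max ts (min p.2 te)) := by omega
      tauto

-- ===== VERDICT (by name: the statement is the Claim_ definition above) =====
theorem clip_ranges_to_timeline_spec : Claim_equal_clip_ranges_to_timeline := by
  intro ranges ts te _
  unfold Spec_clip_ranges_to_timeline
  unfold clip_ranges_to_timeline
  rw [pvAlt_eq]
  obtain ⟨hAc, hAcov⟩ := pvNormalize_result (ranges.foldl (pvClipStep ts te) [])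
  obtain ⟨hBc, hBcov⟩ := pvBFold_inv ts te ranges [] ⟨by simp, by simp⟩
  apply pvUnique _ _ hAc hBc
  intro x
  rw [hAcov x, hBcov x, pvClip_foldl_cov ts te ranges [] x]
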